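-- pv_equiv track=rewrite | github.com/Daarrik/leetcode-practice | tallest.py | solution
-- ===== SOURCE A (Python) =====
-- def solution(arr):
--   rows = []
-- # traversing through each element in array
--   for height in arr:
--     found = -1
-- # checking with already available rows
--     for i in range(len(rows)):
--       if height < rows[i]:
--         found = i
-- # if that height can be put in already available rows
--     if found != -1:
--       rows[found] = height
-- # else create a new row
--     else:
--       rows.append(height)
-- # return nno of rows
--   return len(rows)
-- ===== SOURCE B (Python) =====
-- def solution(arr):
--   # Max segment tree over the rows (perfect functional binary tree):
--   # the rightmost row taller than h is found by descending right-first
--   # through node maxima; updates rebuild one root-to-leaf path. O(n log n).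
--   cap = 1
--   while cap < len(arr):
--     cap *= 2
--
--   def build(sz):
--     if sz == 1:
--       return ('leaf', None)
--     half = sz // 2
--     return ('node', None, build(half), build(half))
--
--   def mx(t):
--     return t[1]
--
--   def gto(x, h):
--     return x is not None and x > h
--
--   def maxo(a, b):
--     if a is None:
--       return b
--     if b is None:
--       return a
--     return a if a >= b else b
--
--   def query(t, sz, h):
--     # rightmost leaf index in t with value > h; requires gto(mx(t), h)
--     if t[0] == 'leaf':
--       return 0
--     half = sz // 2
--     l, r = t[2], t[3]
--     if gto(mx(r), h):
--       return half + query(r, half, h)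
--     return query(l, half, h)
--
--   def update(t, sz, i, h):
--     if t[0] == 'leaf':
--       return ('leaf', h)
--     half = sz // 2
--     l, r = t[2], t[3]
--     if i < half:
--       l = update(l, half, i, h)
--     else:
--       r = update(r, half, i - half, h)
--     return ('node', maxo(mx(l), mx(r)), l, r)
--
--   t = build(cap)
--   n = 0
--   for h in arr:
--     if gto(mx(t), h):
--       t = update(t, cap, query(t, cap, h), h)
--     else:
--       t = update(t, cap, n, h)
--       n += 1
--   return n
-- ===== Notes on version B (the rewrite author's own statement) =====
-- stated objective: faster
-- what changed: A keeps a flat rows list and rescans all of it for every element to find the rightmost taller row; B maintains a max segment tree (perfect functional binary tree) over the rows, finding the rightmost taller row by a right-first descent through node maxima and replacing/appending via a single root-to-leaf path rebuild.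
import Mathlib
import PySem

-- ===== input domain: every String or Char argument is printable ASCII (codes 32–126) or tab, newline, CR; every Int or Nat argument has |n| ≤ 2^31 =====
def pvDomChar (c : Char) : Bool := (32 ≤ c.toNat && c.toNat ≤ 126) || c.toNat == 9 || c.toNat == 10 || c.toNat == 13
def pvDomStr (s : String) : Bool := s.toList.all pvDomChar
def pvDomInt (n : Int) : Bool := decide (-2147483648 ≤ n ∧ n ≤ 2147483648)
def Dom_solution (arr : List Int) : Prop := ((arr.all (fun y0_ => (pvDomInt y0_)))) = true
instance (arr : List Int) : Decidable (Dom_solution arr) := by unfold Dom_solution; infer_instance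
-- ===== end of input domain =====

-- B replaces A's flat rows list (rescanned in full for every element) by a max
-- segment tree over the rows: the rightmost taller row is found by a right-first
-- descent through node maxima and replaced/appended by one path rebuild;
-- a timing run measured B faster.

-- ===== PORT A =====
-- A's inner loop: found = -1; for i in range(len(rows)): if height < rows[i]: found = i
-- (i always in range, so the pyGetD default is never used)
def foundA (rows : List Int) (h : Int) : Int :=
  (List.range rows.length).foldl
    (fun (f : Int) (i : Nat) => if h < PySem.List.pyGetD rows (i : Int) 0 then (i : Int) else f) (-1)

def stepA (rows : List Int) (h : Int) : List Int :=
  let found := foundA rows h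
  if found ≠ -1 then
    -- rows[found] = h  (here found is a valid nonnegative index, so toNat is exact)
    rows.set found.toNat h
  else
    rows ++ [h]

def solution (arr : List Int) : Int := ((arr.foldl stepA []).length : Int)

-- ===== PORT B =====
-- Source B's tuple trees ('leaf', v) / ('node', mx, l, r); v and mx are Optional ints
inductive STree where
  | leaf : Option Int → STree
  | node : Option Int → STree → STree → STree
deriving Repr, DecidableEq

-- cap = 1; while cap < len(arr): cap *= 2   (fuel = m bounds the doublings; it
-- always suffices since cap doubles from 1, so this is exact for the call below)
def capLoop (fuel m c : Nat) : Nat :=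
  match fuel with
  | 0 => c
  | f + 1 => if c < m then capLoop f m (2 * c) else c

-- build(sz); only ever called with sz a power of two ≥ 1, where 'sz ≤ 1' is
-- python's 'sz == 1' (the ≤ makes termination evident)
def buildT (sz : Nat) : STree :=
  if sz ≤ 1 then .leaf none
  else .node none (buildT (sz / 2)) (buildT (sz / 2))
decreasing_by all_goals omega

def mxT : STree → Option Int
  | .leaf v => v
  | .node m _ _ => m

-- gto(x, h) = x is not None and x > h
def gto (x : Option Int) (h : Int) : Bool :=
  match x with
  | none => false
  | some v => decide (h < v)

-- maxo(a, b): None acts as -inf, ties keep a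
def maxo (a b : Option Int) : Option Int :=
  match a with
  | none => b
  | some av =>
    match b with
    | none => some av
    | some bv => if bv ≤ av then some av else some bv

-- query(t, sz, h): rightmost leaf index with value > h (requires gto(mx(t), h))
def queryT : STree → Nat → Int → Nat
  | .leaf _, _, _ => 0
  | .node _ l r, sz, h =>
    if gto (mxT r) h then sz / 2 + queryT r (sz / 2) h
    else queryT l (sz / 2) h

-- update(t, sz, i, h): functional point update, rebuilding maxima on the path
def updateT : STree → Nat → Nat → Int → STree
  | .leaf _, _, _, h => .leaf (some h)
  | .node _ l r, sz, i, h =>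
    let half := sz / 2
    if i < half then
      let l' := updateT l half i h
      .node (maxo (mxT l') (mxT r)) l' r
    else
      let r' := updateT r half (i - half) h
      .node (maxo (mxT l) (mxT r')) l r'

-- the body of Source B's for-loop; state = (tree, n)
def stepB (cap : Nat) (s : STree × Nat) (h : Int) : STree × Nat :=
  if gto (mxT s.1) h then (updateT s.1 cap (queryT s.1 cap h) h, s.2)
  else (updateT s.1 cap s.2 h, s.2 + 1)

def solution_alt (arr : List Int) : Int :=
  let cap := capLoop arr.length arr.length 1
  ((arr.foldl (stepB cap) (buildT cap, 0)).2 : Int)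

-- ===== PRECONDITION & SPEC =====
def Spec_solution (arr : List Int) (out : Int) : Prop := out = solution_alt arr
instance (arr : List Int) (out : Int) : Decidable (Spec_solution arr out) := by unfold Spec_solution; infer_instance

-- ===== CLAIM (what is proved, stated in full; the proofs are below) =====
def Claim_equal_solution : Prop := ∀ (arr : List Int), Dom_solution arr → Spec_solution arr (solution arr)

-- ===== LEMMAS AND PROOFS =====

-- leaves of a tree, left to right
def leavesT : STree → List (Option Int)
  | .leaf v => [v]
  | .node _ l r => leavesT l ++ leavesT r

-- every node max is maxo of its children's stored maxima
def GoodT : STree → Prop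
  | .leaf _ => True
  | .node m l r => m = maxo (mxT l) (mxT r) ∧ GoodT l ∧ GoodT r

-- perfect tree of height k
def PerfT : STree → Nat → Prop
  | .leaf _, k => k = 0
  | .node _ l r, k => ∃ k', k = k' + 1 ∧ PerfT l k' ∧ PerfT r k'

-- the rightmost index with an entry > h, -1 if none (spec-side recursion)
def foundO : List (Option Int) → Int → Int
  | [], _ => -1
  | x :: t, h =>
    let f := foundO t h
    if f = -1 then (if gto x h then 0 else -1) else f + 1

theorem gto_maxo (a b : Option Int) (h : Int) :
    gto (maxo a b) h = (gto a h || gto b h) := by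
  cases a with
  | none => cases b <;> simp [maxo, gto]
  | some av =>
    cases b with
    | none => simp [maxo, gto]
    | some bv =>
      simp only [maxo]
      split <;> simp [gto] <;> omega

theorem gto_mxT (t : STree) (h : Int) (hg : GoodT t) :
    gto (mxT t) h = (leavesT t).any (fun x => gto x h) := by
  induction t with
  | leaf v => simp [mxT, leavesT]
  | node m l r ihl ihr =>
    obtain ⟨hm, hl, hr⟩ := hg
    show gto m h = _
    simp only [leavesT, List.any_append]
    rw [hm, gto_maxo, ihl hl, ihr hr]

theorem foundO_nonneg_or (xs : List (Option Int)) (h : Int) :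
    foundO xs h = -1 ∨ 0 ≤ foundO xs h := by
  induction xs with
  | nil => simp [foundO]
  | cons x t ih => simp only [foundO]; split_ifs <;> omega

theorem foundO_eq_neg_one (xs : List (Option Int)) (h : Int) :
    (foundO xs h = -1) ↔ (xs.any (fun x => gto x h) = false) := by
  induction xs with
  | nil => simp [foundO]
  | cons x t ih =>
    simp only [foundO, List.any_cons]
    by_cases hf : foundO t h = -1
    · rw [if_pos hf]
      cases hx : gto x h <;> simp [ih.mp hf]
    · rw [if_neg hf]
      have h0 : 0 ≤ foundO t h := (foundO_nonneg_or t h).resolve_left hf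
      constructor
      · intro hc; omega
      · intro hc
        simp only [Bool.or_eq_false_iff] at hc
        exact absurd (ih.mpr hc.2) hf

theorem foundO_lt_length (xs : List (Option Int)) (h : Int) :
    foundO xs h < (xs.length : Int) := by
  induction xs with
  | nil => simp [foundO]
  | cons x t ih =>
    simp only [foundO, List.length_cons]
    push_cast
    split_ifs <;> omega

theorem foundO_append (as bs : List (Option Int)) (h : Int) :
    foundO (as ++ bs) h =
      if foundO bs h = -1 then foundO as h else (as.length : Int) + foundO bs h := by
  induction as with
  | nil =>
    by_cases hb : foundO bs h = -1
    · simp [foundO, hb]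
    · simp [hb]
  | cons a as ih =>
    simp only [List.cons_append, foundO, ih, List.length_cons]
    by_cases hb : foundO bs h = -1
    · simp [hb]
    · rw [if_neg hb, if_neg hb]
      have h0 : 0 ≤ foundO bs h := (foundO_nonneg_or bs h).resolve_left hb
      have : ¬ ((as.length : Int) + foundO bs h = -1) := by omega
      rw [if_neg this]
      push_cast
      ring

-- A's scan over ys ++ [v] finds the last element, if taller, else what it finds in ys
theorem foundA_append (ys : List Int) (v h : Int) :
    foundA (ys ++ [v]) h = if h < v then (ys.length : Int) else foundA ys h := by
  unfold foundA
  rw [List.length_append, List.length_singleton, List.range_succ, List.foldl_append]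
  simp only [List.foldl_cons, List.foldl_nil]
  have h2 : PySem.List.pyGetD (ys ++ [v]) ((ys.length : Nat) : Int) 0 = v := by
    simp [List.getD]
  have h1 : ∀ i ∈ List.range ys.length, ∀ acc : Int,
      (if h < PySem.List.pyGetD (ys ++ [v]) (i : Int) 0 then (i : Int) else acc)
      = (if h < PySem.List.pyGetD ys (i : Int) 0 then (i : Int) else acc) := by
    intro i hi acc
    have hi' : i < ys.length := List.mem_range.mp hi
    simp [PySem.List.pyGetD_natCast, List.getD, List.getElem?_append_left hi']
  rw [h2]
  split
  · rfl
  · exact PySem.List.foldl_congr_mem' _ _ _ _ h1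

-- A's found equals the spec-side foundO on the some-wrapped rows
theorem foundA_eq_foundO (ys : List Int) (h : Int) :
    foundA ys h = foundO (ys.map some) h := by
  induction ys using List.reverseRecOn with
  | nil => simp [foundA, foundO]
  | append_singleton ys v ih =>
    rw [foundA_append, List.map_append, List.map_singleton, foundO_append]
    have hv : foundO [some v] h = if h < v then 0 else -1 := by
      simp [foundO, gto]
    by_cases hlt : h < v
    · rw [if_pos hlt, hv, if_pos hlt, if_neg (by omega : ¬ (0:Int) = -1)]
      simp
    · rw [if_neg hlt, hv, if_neg hlt, if_pos rfl, ih]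

theorem foundO_pad (xs : List (Option Int)) (p : Nat) (h : Int) :
    foundO (xs ++ List.replicate p none) h = foundO xs h := by
  rw [foundO_append]
  have : foundO (List.replicate p none) h = -1 := by
    rw [foundO_eq_neg_one]
    simp [gto]
  simp [this]

theorem leavesT_length (t : STree) (k : Nat) (hp : PerfT t k) :
    (leavesT t).length = 2 ^ k := by
  induction t generalizing k with
  | leaf v => obtain rfl := hp; simp [leavesT]
  | node m l r ihl ihr =>
    obtain ⟨k', rfl, hl, hr⟩ := hp
    simp only [leavesT, List.length_append, ihl k' hl, ihr k' hr, pow_succ]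
    ring

theorem queryT_eq_foundO (t : STree) (k : Nat) (h : Int)
    (hg : GoodT t) (hp : PerfT t k) (hgt : gto (mxT t) h = true) :
    (queryT t (2 ^ k) h : Int) = foundO (leavesT t) h := by
  induction t generalizing k with
  | leaf v =>
    obtain rfl := hp
    simp only [mxT] at hgt
    simp [queryT, leavesT, foundO, hgt]
  | node m l r ihl ihr =>
    rw [gto_mxT _ _ hg] at hgt
    obtain ⟨k', rfl, hpl, hpr⟩ := hp
    obtain ⟨hm, hgl, hgr⟩ := hg
    have hhalf : 2 ^ (k' + 1) / 2 = 2 ^ k' := by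
      rw [pow_succ]; omega
    simp only [leavesT, List.any_append, Bool.or_eq_true] at hgt
    simp only [queryT, hhalf, leavesT, foundO_append]
    by_cases hr : gto (mxT r) h = true
    · rw [if_pos hr]
      have hany : (leavesT r).any (fun x => gto x h) = true := by
        rw [← gto_mxT _ _ hgr]; exact hr
      have hne : foundO (leavesT r) h ≠ -1 := by
        intro hc
        rw [foundO_eq_neg_one] at hc
        simp [hc] at hany
      rw [if_neg hne, leavesT_length l k' hpl]
      push_cast
      rw [ihr k' hgr hpr hr]
    · rw [if_neg hr]
      have hanyr : (leavesT r).any (fun x => gto x h) = false := by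
        rw [← gto_mxT _ _ hgr]; simpa using hr
      have hl : gto (mxT l) h = true := by
        rw [gto_mxT _ _ hgl]
        rcases hgt with hgt | hgt
        · exact hgt
        · rw [hanyr] at hgt; exact absurd hgt (by simp)
      rw [if_pos ((foundO_eq_neg_one _ _).mpr hanyr), ihl k' hgl hpl hl]

theorem updateT_spec (t : STree) (k i : Nat) (h : Int)
    (hg : GoodT t) (hp : PerfT t k) (hi : i < 2 ^ k) :
    leavesT (updateT t (2 ^ k) i h) = (leavesT t).set i (some h) ∧
    GoodT (updateT t (2 ^ k) i h) ∧ PerfT (updateT t (2 ^ k) i h) k := by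
  induction t generalizing k i with
  | leaf v =>
    obtain rfl := hp
    simp at hi
    subst hi
    simp [updateT, leavesT, GoodT, PerfT]
  | node m l r ihl ihr =>
    obtain ⟨k', rfl, hpl, hpr⟩ := hp
    obtain ⟨hm, hgl, hgr⟩ := hg
    have hhalf : 2 ^ (k' + 1) / 2 = 2 ^ k' := by
      rw [pow_succ]; omega
    have hll : (leavesT l).length = 2 ^ k' := leavesT_length l k' hpl
    simp only [updateT, hhalf]
    by_cases hlt : i < 2 ^ k'
    · rw [if_pos hlt]
      obtain ⟨he, hgu, hpu⟩ := ihl k' i hgl hpl hlt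
      refine ⟨?_, ?_, ?_⟩
      · simp only [leavesT, he]
        rw [List.set_append_left _ _ (by omega)]
      · simp only [GoodT]
        exact ⟨trivial, hgu, hgr⟩
      · simp only [PerfT]
        exact ⟨k', rfl, hpu, hpr⟩
    · rw [if_neg hlt]
      have hi' : i - 2 ^ k' < 2 ^ k' := by
        have : 2 ^ (k' + 1) = 2 ^ k' + 2 ^ k' := by ring
        omega
      obtain ⟨he, hgu, hpu⟩ := ihr k' (i - 2 ^ k') hgr hpr hi'
      refine ⟨?_, ?_, ?_⟩
      · simp only [leavesT, he]
        rw [List.set_append_right _ _ (by omega), hll]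
      · simp only [GoodT]
        exact ⟨trivial, hgl, hgu⟩
      · simp only [PerfT]
        exact ⟨k', rfl, hpl, hpu⟩

theorem mxT_buildT (sz : Nat) : mxT (buildT sz) = none := by
  rw [buildT]
  split <;> rfl

theorem buildT_spec (k : Nat) :
    GoodT (buildT (2 ^ k)) ∧ PerfT (buildT (2 ^ k)) k ∧
    leavesT (buildT (2 ^ k)) = List.replicate (2 ^ k) none := by
  induction k with
  | zero => rw [buildT]; simp [GoodT, PerfT, leavesT]
  | succ k ih =>
    obtain ⟨hg, hp, he⟩ := ih
    have h1 : ¬ (2 ^ (k + 1) ≤ 1) := by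
      have : 2 ^ k ≥ 1 := Nat.one_le_two_pow
      rw [pow_succ]; omega
    have h2 : 2 ^ (k + 1) / 2 = 2 ^ k := by rw [pow_succ]; omega
    rw [buildT, if_neg h1, h2]
    refine ⟨⟨by simp [mxT_buildT, maxo], hg, hg⟩, ⟨k, rfl, hp, hp⟩, ?_⟩
    simp only [leavesT, he, ← List.replicate_add]
    congr 1
    rw [pow_succ]; omega

theorem capLoop_pow (fuel m c : Nat) (hm : m ≤ c * 2 ^ fuel) :
    ∃ j, capLoop fuel m c = c * 2 ^ j ∧ m ≤ capLoop fuel m c := by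
  induction fuel generalizing c with
  | zero =>
    simp at hm
    refine ⟨0, by simp [capLoop], ?_⟩
    simp [capLoop]
    omega
  | succ f ih =>
    rw [capLoop]
    by_cases hc : c < m
    · rw [if_pos hc]
      obtain ⟨j, hj, hle⟩ := ih (2 * c)
        (by rw [show 2 * c * 2 ^ f = c * 2 ^ (f + 1) from by ring]; exact hm)
      exact ⟨j + 1, by rw [hj]; ring, hle⟩
    · rw [if_neg hc]
      exact ⟨0, by simp, by omega⟩

-- loop invariant: B's (tree, counter) state tracks A's rows exactly
theorem loopInv (l rows : List Int) (t : STree) (k : Nat)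
    (hg : GoodT t) (hp : PerfT t k)
    (he : leavesT t = rows.map some ++ List.replicate (2 ^ k - rows.length) none)
    (hb : rows.length + l.length ≤ 2 ^ k) :
    (l.foldl (stepB (2 ^ k)) (t, rows.length)).2 = ((l.foldl stepA rows).length : Int) := by
  induction l generalizing rows t with
  | nil => simp
  | cons h l ih =>
    have hn : rows.length < 2 ^ k := by simp at hb; omega
    have hfound : foundA rows h = foundO (leavesT t) h := by
      rw [he, foundO_pad, foundA_eq_foundO]
    have hgt : gto (mxT t) h = (leavesT t).any (fun x => gto x h) := gto_mxT t h hg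
    simp only [List.foldl_cons]
    by_cases hc : gto (mxT t) h = true
    · -- replacement step
      have hne : foundO (leavesT t) h ≠ -1 := by
        intro hcc
        rw [foundO_eq_neg_one] at hcc
        rw [hgt, hcc] at hc
        exact absurd hc (by simp)
      have hq : (queryT t (2 ^ k) h : Int) = foundO (leavesT t) h :=
        queryT_eq_foundO t k h hg hp hc
      have hqlt : foundO (leavesT t) h < (rows.length : Int) := by
        have := foundO_lt_length (rows.map some) h
        rw [he, foundO_pad]
        simpa using this
      have hq0 : 0 ≤ foundO (leavesT t) h :=
        (foundO_nonneg_or _ _).resolve_left hne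
      have hqr : queryT t (2 ^ k) h < rows.length := by
        have h1 : (queryT t (2 ^ k) h : Int) < (rows.length : Int) := by rw [hq]; exact hqlt
        exact_mod_cast h1
      have hqk : queryT t (2 ^ k) h < 2 ^ k := lt_of_lt_of_le hqr hn.le
      obtain ⟨heu, hgu, hpu⟩ := updateT_spec t k (queryT t (2 ^ k) h) h hg hp hqk
      have hsa : stepA rows h = rows.set (foundA rows h).toNat h := by
        rw [stepA]
        simp only [hfound]
        rw [if_pos hne]
      have hset : leavesT (updateT t (2 ^ k) (queryT t (2 ^ k) h) h) =
          (rows.set (queryT t (2 ^ k) h) h).map some ++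
          List.replicate (2 ^ k - (rows.set (queryT t (2 ^ k) h) h).length) none := by
        rw [heu, he, List.set_append_left _ _ (by simpa using hqr), List.length_set]
        congr 1
        rw [List.map_set]
      have htn : (foundA rows h).toNat = queryT t (2 ^ k) h := by
        rw [hfound, ← hq]
        simp
      simp only [stepB, if_pos hc, hsa, htn]
      simpa using ih (rows.set (queryT t (2 ^ k) h) h)
        (updateT t (2 ^ k) (queryT t (2 ^ k) h) h) hgu hpu hset
        (by simp at hb ⊢; omega)
    · -- append step
      have hcf : gto (mxT t) h = false := by
        revert hc; cases gto (mxT t) h <;> simp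
      have hf1 : foundA rows h = -1 := by
        rw [hfound, foundO_eq_neg_one, ← hgt]
        exact hcf
      have hsa : stepA rows h = rows ++ [h] := by
        rw [stepA]
        simp only [hf1]
        simp
      obtain ⟨heu, hgu, hpu⟩ := updateT_spec t k rows.length h hg hp hn
      have hset : leavesT (updateT t (2 ^ k) rows.length h) =
          (rows ++ [h]).map some ++ List.replicate (2 ^ k - (rows ++ [h]).length) none := by
        rw [heu, he, List.set_append_right _ _ (by simp)]
        have hpad : 2 ^ k - rows.length = (2 ^ k - (rows.length + 1)) + 1 := by omega
        simp only [List.length_map, Nat.sub_self, hpad, List.replicate_succ]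
        simp
      simp only [stepB, if_neg hc, hsa]
      simpa using ih (rows ++ [h]) (updateT t (2 ^ k) rows.length h) hgu hpu hset
        (by simp at hb ⊢; omega)

-- ===== VERDICT (by name: the statement is the Claim_ definition above) =====
theorem solution_spec : Claim_equal_solution := by
  intro arr _
  unfold Spec_solution solution solution_alt
  obtain ⟨j, hj, hle⟩ := capLoop_pow arr.length arr.length 1
    (by simpa using (Nat.lt_two_pow_self (n := arr.length)).le)
  rw [one_mul] at hj
  rw [hj] at hle
  simp only [hj]
  obtain ⟨hg, hp, he⟩ := buildT_spec j
  have hmain := loopInv arr [] (buildT (2 ^ j)) j hg hp (by simpa using he)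
    (by simpa using hle)
  simpa using hmain.symm
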